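-- pv_equiv track=rewrite | github.com/armandosmo/loteria_kanji | backend/game.py | validar_loteria
-- ===== SOURCE A (Python) =====
-- def validar_loteria(
--     carton: list[int],
--     marcadas: list[bool],
--     cantados: set[int],
--     patron: str,
--     tamano: int,
-- ) -> bool:
--     marcados_ids = {carton[i] for i, m in enumerate(marcadas) if m}
--
--     # Cada casilla marcada debe haber sido cantada
--     if not marcados_ids.issubset(cantados):
--         return False
--
--     # `validos[i]` es True solo si la casilla i está marcada Y la carta
--     # correspondiente fue cantada por el Gritón. Sirve como base común
--     # para comprobar cualquier patrón sin volver a validar la pertenencia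
--     # al conjunto `cantados` dentro de cada rama.
--     validos = [
--         marcadas[i] and (carton[i] in cantados)
--         for i in range(len(carton))
--     ]
--
--     # Reorganizamos la lista plana en una matriz `tamano x tamano`
--     # para razonar geométricamente sobre filas, columnas y diagonales.
--     matriz = [
--         validos[fila * tamano:(fila + 1) * tamano]
--         for fila in range(tamano)
--     ]
--
--     if patron == "full":
--         # "full" exige que TODAS las casillas estén válidamente marcadas.
--         return all(validos)
--
--     if patron == "line":
--         # "line" acepta cualquier fila completa (horizontal) O cualquier
--         # columna completa (vertical). Anteriormente solo verificaba
--         # filas; ahora se acepta también la dirección vertical.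
--         for fila in matriz:
--             if all(fila):
--                 return True
--         for col in range(tamano):
--             if all(matriz[fila][col] for fila in range(tamano)):
--                 return True
--         return False
--
--     if patron == "diagonal":
--         # "diagonal" acepta la diagonal principal (↘: arriba-izq → abajo-der)
--         # o la diagonal secundaria (↙: arriba-der → abajo-izq).
--         if all(matriz[i][i] for i in range(tamano)):
--             return True
--         if all(matriz[i][tamano - 1 - i] for i in range(tamano)):
--             return True
--         return False
--
--     if patron == "corners":
--         # "corners" requiere las 4 esquinas de la grilla marcadas.
--         return (
--             matriz[0][0]
--             and matriz[0][tamano - 1]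
--             and matriz[tamano - 1][0]
--             and matriz[tamano - 1][tamano - 1]
--         )
--
--     return False
-- ===== SOURCE B (Python) =====
-- def validar_loteria(
--     carton: list[int],
--     marcadas: list[bool],
--     cantados: set[int],
--     patron: str,
--     tamano: int,
-- ) -> bool:
--     # Every marked cell must have been called.
--     if any(m and carton[i] not in cantados for i, m in enumerate(marcadas)):
--         return False
--     # After the guard, a cell is "validly marked" iff it is marked, so each
--     # pattern reduces to checking flat index groups against `marcadas` alone.
--     n = tamano
--     if patron == "full":
--         grupos = [list(range(len(carton)))]
--     elif patron == "line":
--         grupos = [list(range(f * n, f * n + n)) for f in range(n)] + \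
--                  [list(range(c, n * n, n)) for c in range(n)]
--     elif patron == "diagonal":
--         grupos = [[i * n + i for i in range(n)],
--                   [i * n + (n - 1 - i) for i in range(n)]]
--     elif patron == "corners":
--         grupos = [[0, n - 1, (n - 1) * n, n * n - 1]]
--     else:
--         return False
--     return any(all(marcadas[i] for i in g) for g in grupos)
-- ===== Notes on version B (the rewrite author's own statement) =====
-- stated objective: simpler
-- what changed: B drops A's per-cell set membership recheck and the list-of-lists matrix: after one guard pass over enumerate(marcadas) it picks the pattern's flat index groups (row ranges, strided column ranges, diagonal/corner index lists) and tests them against marcadas alone.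
-- outside the precondition, e.g. on validar_loteria([1], [True], {1}, 'line', 2): A returns True, B raises IndexError
import Mathlib
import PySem

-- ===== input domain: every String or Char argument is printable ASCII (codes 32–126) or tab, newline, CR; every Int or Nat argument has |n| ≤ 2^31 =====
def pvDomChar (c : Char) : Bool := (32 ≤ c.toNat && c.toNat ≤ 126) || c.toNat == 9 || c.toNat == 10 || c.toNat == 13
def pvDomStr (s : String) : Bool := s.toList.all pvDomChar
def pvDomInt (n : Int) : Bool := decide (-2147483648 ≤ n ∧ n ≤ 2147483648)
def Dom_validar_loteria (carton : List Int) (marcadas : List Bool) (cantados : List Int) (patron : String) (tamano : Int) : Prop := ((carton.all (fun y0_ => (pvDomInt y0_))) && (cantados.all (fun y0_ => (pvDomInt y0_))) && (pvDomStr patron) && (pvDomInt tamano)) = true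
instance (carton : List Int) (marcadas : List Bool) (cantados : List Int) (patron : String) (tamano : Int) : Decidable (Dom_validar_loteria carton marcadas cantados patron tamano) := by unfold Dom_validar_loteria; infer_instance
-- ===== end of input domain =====

-- B replaces A's matrix reshaping and per-cell membership tests by a single
-- called-numbers guard followed by flat index groups checked against `marcadas`
-- alone (objective: simpler).

-- ===== PORT A =====
def validar_loteria (carton : List Int) (marcadas : List Bool) (cantados : List Int) (patron : String) (tamano : Int) : Bool :=
  let marcados_ids : PySem.Set Int :=
    PySem.Set.ofList ((PySem.List.enumerate marcadas 0).filterMap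
      (fun p => if p.2 then some (PySem.List.pyGetD carton p.1 0) else none))
  if !(PySem.Set.issubset marcados_ids cantados) then false
  else
    let validos : List Bool := (PySem.List.pyRange 0 (carton.length : Int) 1).map
      (fun i => PySem.List.pyGetD marcadas i false && cantados.contains (PySem.List.pyGetD carton i 0))
    let matriz : List (List Bool) := (PySem.List.pyRange 0 tamano 1).map
      (fun fila => PySem.List.slice validos (some (fila * tamano)) (some ((fila + 1) * tamano)))
    if patron == "full" then validos.all id
    else if patron == "line" then
      (matriz.any (fun fila => fila.all id)) ||
      (PySem.List.pyRange 0 tamano 1).any (fun col =>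
        (PySem.List.pyRange 0 tamano 1).all (fun fila =>
          PySem.List.pyGetD (PySem.List.pyGetD matriz fila []) col false))
    else if patron == "diagonal" then
      ((PySem.List.pyRange 0 tamano 1).all (fun i =>
        PySem.List.pyGetD (PySem.List.pyGetD matriz i []) i false)) ||
      ((PySem.List.pyRange 0 tamano 1).all (fun i =>
        PySem.List.pyGetD (PySem.List.pyGetD matriz i []) (tamano - 1 - i) false))
    else if patron == "corners" then
      PySem.List.pyGetD (PySem.List.pyGetD matriz 0 []) 0 false &&
      PySem.List.pyGetD (PySem.List.pyGetD matriz 0 []) (tamano - 1) false &&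
      PySem.List.pyGetD (PySem.List.pyGetD matriz (tamano - 1) []) 0 false &&
      PySem.List.pyGetD (PySem.List.pyGetD matriz (tamano - 1) []) (tamano - 1) false
    else false

-- ===== PORT B =====
def validar_loteria_alt (carton : List Int) (marcadas : List Bool) (cantados : List Int) (patron : String) (tamano : Int) : Bool :=
  if (PySem.List.enumerate marcadas 0).any
      (fun p => p.2 && !(cantados.contains (PySem.List.pyGetD carton p.1 0))) then false
  else
    let n := tamano
    let grupos? : Option (List (List Int)) :=
      if patron == "full" then
        some [PySem.List.pyRange 0 (carton.length : Int) 1]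
      else if patron == "line" then
        some (((PySem.List.pyRange 0 n 1).map (fun f => PySem.List.pyRange (f * n) (f * n + n) 1)) ++
              ((PySem.List.pyRange 0 n 1).map (fun c => PySem.List.pyRange c (n * n) n)))
      else if patron == "diagonal" then
        some [(PySem.List.pyRange 0 n 1).map (fun i => i * n + i),
              (PySem.List.pyRange 0 n 1).map (fun i => i * n + (n - 1 - i))]
      else if patron == "corners" then
        some [[0, n - 1, (n - 1) * n, n * n - 1]]
      else none
    match grupos? with
    | none => false
    | some grupos => grupos.any (fun g => g.all (fun i => PySem.List.pyGetD marcadas i false))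

-- ===== PRECONDITION & SPEC =====
-- Pre_ excludes exactly the ill-formed boards on which A raises IndexError (a marked
-- cell beyond carton, carton longer than marcadas, or a pattern check run off a short
-- row of an undersized tamano×tamano board) together with the undersized boards on
-- which A's clamped row slices make "line"/"diagonal"/"corners" return an accident of
-- the slicing (e.g. a vacuously full short row); every input on which the guard fails
-- (some marked number uncalled), and every full-sized board, stays inside.
def Pre_validar_loteria (carton : List Int) (marcadas : List Bool) (cantados : List Int) (patron : String) (tamano : Int) : Prop :=
  (∀ i < marcadas.length, carton.length ≤ i → marcadas.getD i false = false) ∧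
  ((¬ ∀ i < marcadas.length, marcadas.getD i false = true → cantados.contains (carton.getD i 0) = true) ∨
    (carton.length ≤ marcadas.length ∧
      (patron = "full" ∨
       (patron ≠ "line" ∧ patron ≠ "diagonal" ∧ patron ≠ "corners") ∨
       (1 ≤ tamano ∧ tamano * tamano ≤ (carton.length : Int)) ∨
       ((patron = "line" ∨ patron = "diagonal") ∧ tamano ≤ 0))))
instance (carton : List Int) (marcadas : List Bool) (cantados : List Int) (patron : String) (tamano : Int) : Decidable (Pre_validar_loteria carton marcadas cantados patron tamano) := by unfold Pre_validar_loteria; infer_instance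

def pvWitness_validar_loteria : List Int × List Bool × List Int × String × Int :=
  ([3, 5, 7, 9], [true, false, false, true], [3, 9, 11], "diagonal", 2)

def Spec_validar_loteria (carton : List Int) (marcadas : List Bool) (cantados : List Int) (patron : String) (tamano : Int) (out : Bool) : Prop := out = validar_loteria_alt carton marcadas cantados patron tamano
instance (carton : List Int) (marcadas : List Bool) (cantados : List Int) (patron : String) (tamano : Int) (out : Bool) : Decidable (Spec_validar_loteria carton marcadas cantados patron tamano out) := by unfold Spec_validar_loteria; infer_instance

-- ===== CLAIM (what is proved, stated in full; the proofs are below) =====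
def Claim_equal_validar_loteria : Prop := ∀ (carton : List Int) (marcadas : List Bool) (cantados : List Int) (patron : String) (tamano : Int), Dom_validar_loteria carton marcadas cantados patron tamano → Pre_validar_loteria carton marcadas cantados patron tamano → Spec_validar_loteria carton marcadas cantados patron tamano (validar_loteria carton marcadas cantados patron tamano)

-- ===== LEMMAS AND PROOFS =====

lemma pv_all_congr {α : Type} {l : List α} {f g : α → Bool} (h : ∀ x ∈ l, f x = g x) :
    l.all f = l.all g := by
  rw [Bool.eq_iff_iff]
  simp only [List.all_eq_true]
  constructor
  · intro h' x hx; rw [← h x hx]; exact h' x hx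
  · intro h' x hx; rw [h x hx]; exact h' x hx

lemma pv_all_pyRange (N : Nat) (F : Int → Bool) :
    (PySem.List.pyRange 0 (N : Int) 1).all F = (List.range N).all (fun k : Nat => F (k : Int)) := by
  rw [PySem.List.pyRange_zero_natCast, List.all_map]
  rfl

-- `getD` looks through a `take` below its bound.
lemma pv_getD_take (l : List Bool) (L k : Nat) (hk : k < L) :
    (l.take L).getD k false = l.getD k false := by
  simp [List.getD_eq_getElem?_getD, List.getElem?_take_of_lt hk]

-- The two guards decide the same condition: "some marked cell was not called".
lemma pv_guard_eq (carton : List Int) (marcadas : List Bool) (cantados : List Int) :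
    PySem.Set.issubset
      (PySem.Set.ofList ((PySem.List.enumerate marcadas 0).filterMap
        (fun p => if p.2 then some (PySem.List.pyGetD carton p.1 0) else none)))
      cantados
    = !((PySem.List.enumerate marcadas 0).any
        (fun p => p.2 && !(cantados.contains (PySem.List.pyGetD carton p.1 0)))) := by
  rw [Bool.eq_iff_iff]
  simp only [PySem.Set.issubset, List.all_eq_true, Bool.not_eq_eq_eq_not, Bool.not_true,
    List.any_eq_false, Bool.and_eq_true, not_and]
  constructor
  · intro h p hp hp2
    have := h (PySem.List.pyGetD carton p.1 0) ?_
    · simpa using this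
    · have : (PySem.List.pyGetD carton p.1 0) ∈
        ((PySem.List.enumerate marcadas 0).filterMap
          (fun p => if p.2 then some (PySem.List.pyGetD carton p.1 0) else none)) := by
        apply List.mem_filterMap.mpr
        exact ⟨p, hp, by simp [hp2]⟩
      simpa [PySem.Set.mem_ofList] using this
  · intro h x hx
    rw [PySem.Set.mem_ofList] at hx
    obtain ⟨p, hp, hfx⟩ := List.mem_filterMap.mp hx
    by_cases h2 : p.2
    · simp [h2] at hfx
      subst hfx
      simpa using h p hp h2
    · simp [h2] at hfx

-- A passed guard, read as a statement about positions.
lemma pv_guard_pos (carton : List Int) (marcadas : List Bool) (cantados : List Int)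
    (hok : (PySem.List.enumerate marcadas 0).any
        (fun p => p.2 && !(cantados.contains (PySem.List.pyGetD carton p.1 0))) = false) :
    ∀ i < marcadas.length, marcadas.getD i false = true → cantados.contains (carton.getD i 0) = true := by
  rw [List.any_eq_false] at hok
  intro i hi hm
  have hmem : ((i : Int), marcadas[i]) ∈ PySem.List.enumerate marcadas 0 := by
    rw [PySem.List.mem_enumerate_iff]
    exact ⟨i, hi, by simp⟩
  have := hok _ hmem
  rw [List.getD_eq_getElem _ _ hi] at hm
  simp only [hm, Bool.true_and] at this
  simpa [PySem.List.pyGetD_natCast] using this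

-- Under a passed guard, A's `validos` list is a prefix of `marcadas` itself.
lemma pv_validos_eq (carton : List Int) (marcadas : List Bool) (cantados : List Int)
    (hlen : carton.length ≤ marcadas.length)
    (hok : (PySem.List.enumerate marcadas 0).any
        (fun p => p.2 && !(cantados.contains (PySem.List.pyGetD carton p.1 0))) = false) :
    (PySem.List.pyRange 0 (carton.length : Int) 1).map
      (fun i => PySem.List.pyGetD marcadas i false &&
        cantados.contains (PySem.List.pyGetD carton i 0)) = marcadas.take carton.length := by
  rw [List.any_eq_false] at hok
  rw [PySem.List.pyRange_zero_natCast, List.map_map]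
  apply List.ext_getElem
  · simp [hlen]
  · intro i h1 h2
    have hi : i < carton.length := by simp at h1; omega
    have hi' : i < marcadas.length := by omega
    simp only [List.getElem_map, List.getElem_range, Function.comp_apply, List.getElem_take]
    rw [PySem.List.pyGetD_natCast, List.getD_eq_getElem _ _ hi']
    by_cases hmi : marcadas[i] = true
    · have hmem : ((i : Int), marcadas[i]) ∈ PySem.List.enumerate marcadas 0 := by
        rw [PySem.List.mem_enumerate_iff]
        exact ⟨i, hi', by simp⟩
      have := hok _ hmem
      simp only [hmi, Bool.true_and] at this ⊢
      simpa using this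
    · simp [Bool.not_eq_true] at hmi
      simp [hmi]

-- Flat view of A's matrix access (board may be oversized: N*N ≤ length).
lemma pv_cell (marcadas : List Bool) (N f c : Nat) (hm : N * N ≤ marcadas.length)
    (hf : f < N) (hc : c < N) :
    PySem.List.pyGetD
      (PySem.List.pyGetD ((PySem.List.pyRange 0 (N : Int) 1).map
        (fun fila => PySem.List.slice marcadas (some (fila * (N : Int))) (some ((fila + 1) * (N : Int))))) (f : Int) [])
      (c : Int) false
    = marcadas.getD (f * N + c) false := by
  rw [PySem.List.pyGetD_map_pyRange _ N f [] hf]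
  have e1 : ((f : Int) * (N : Int)) = ((f * N : Nat) : Int) := by push_cast; ring
  have e2 : (((f : Int) + 1) * (N : Int)) = ((f * N : Nat) : Int) + (N : Int) := by push_cast; ring
  rw [e1, e2, PySem.List.slice_natCast_add]
  rw [PySem.List.pyGetD_natCast]
  have hfn : f * N + N ≤ N * N := by nlinarith
  have hlen : (List.take N (List.drop (f * N) marcadas)).length = N := by
    simp; omega
  have hc' : c < (List.take N (List.drop (f * N) marcadas)).length := by omega
  have hidx : f * N + c < marcadas.length := by omega
  rw [List.getD_eq_getElem _ _ hc', List.getD_eq_getElem _ _ hidx]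
  simp [List.getElem_take, List.getElem_drop]

-- all-of-a-contiguous-block, as a range check.
lemma pv_take_drop_all (m : List Bool) (base n : Nat) (h : base + n ≤ m.length) :
    (List.take n (List.drop base m)).all id = (List.range n).all (fun j => m.getD (base + j) false) := by
  rw [Bool.eq_iff_iff]
  simp only [List.all_eq_true, List.mem_range, id]
  have hlen : (List.take n (List.drop base m)).length = n := by simp; omega
  constructor
  · intro h' j hj
    have hlt : base + j < m.length := by omega
    rw [List.getD_eq_getElem _ _ hlt]
    have e : (List.take n (List.drop base m))[j]'(by omega) = m[base + j] := by
      simp [List.getElem_take, List.getElem_drop]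
    rw [← e]
    exact h' _ (List.getElem_mem _)
  · intro h' x hx
    obtain ⟨j, hj, rfl⟩ := List.mem_iff_getElem.mp hx
    have hj' : j < n := by omega
    have := h' j hj'
    rw [List.getD_eq_getElem _ _ (by omega)] at this
    simpa [List.getElem_take, List.getElem_drop] using this

-- "full": all cells of the prefix vs. the flat range group.
lemma pv_full (marcadas : List Bool) (L : Nat) (hL : L ≤ marcadas.length) :
    (marcadas.take L).all id = (PySem.List.pyRange 0 (L : Int) 1).all
      (fun i => PySem.List.pyGetD marcadas i false) := by
  rw [pv_all_pyRange]
  have e : (fun k : Nat => PySem.List.pyGetD marcadas (k : Int) false)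
      = fun k : Nat => marcadas.getD k false := by
    funext k; simp [PySem.List.pyGetD_natCast]
  rw [e]
  have := pv_take_drop_all marcadas 0 L (by omega)
  simpa using this

-- rows of the matrix vs. the contiguous row ranges.
lemma pv_rows (m mv : List Bool) (N : Nat) (hm : N * N ≤ m.length)
    (hagree : ∀ k < N * N, m.getD k false = mv.getD k false) :
    ((PySem.List.pyRange 0 (N : Int) 1).map
      (fun fila => PySem.List.slice m (some (fila * (N : Int))) (some ((fila + 1) * (N : Int))))).any
        (fun fila => fila.all id)
    = ((PySem.List.pyRange 0 (N : Int) 1).map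
        (fun f => PySem.List.pyRange (f * (N : Int)) (f * (N : Int) + (N : Int)) 1)).any
        (fun g => g.all (fun i => PySem.List.pyGetD mv i false)) := by
  rw [List.any_map, List.any_map]
  apply PySem.List.any_congr_mem
  intro fila hmemf
  rw [PySem.List.mem_pyRange_one] at hmemf
  obtain ⟨k, rfl, hk⟩ : ∃ k : Nat, (k : Int) = fila ∧ k < N :=
    ⟨fila.toNat, by omega, by omega⟩
  simp only [Function.comp_apply]
  have e1 : ((k : Int) * (N : Int)) = ((k * N : Nat) : Int) := by push_cast; ring
  have e2 : (((k : Int) + 1) * (N : Int)) = ((k * N : Nat) : Int) + (N : Int) := by push_cast; ring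
  rw [e1, e2, PySem.List.slice_natCast_add]
  have hfn : k * N + N ≤ N * N := by nlinarith
  rw [pv_take_drop_all m (k * N) N (by omega)]
  have e3 : ((k * N : Nat) : Int) + (N : Int) = ((k * N + N : Nat) : Int) := by push_cast; ring
  rw [e3, PySem.List.pyRange_one]
  have e4 : (((k * N + N : Nat) : Int) - ((k * N : Nat) : Int)).toNat = N := by omega
  rw [e4, List.all_map]
  apply pv_all_congr
  intro j hj
  rw [List.mem_range] at hj
  have e5 : ((k * N : Nat) : Int) + (j : Int) = ((k * N + j : Nat) : Int) := by push_cast; ring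
  simp only [Function.comp_apply, e5, PySem.List.pyGetD_natCast]
  exact hagree _ (by omega)

-- the strided column range, written as a map over row indices.
lemma pv_colRange (c N : Nat) (hc : c < N) :
    PySem.List.pyRange (c : Int) ((N : Int) * (N : Int)) (N : Int)
      = (List.range N).map (fun f => ((c + f * N : Nat) : Int)) := by
  have hN : 1 ≤ N := by omega
  rw [PySem.List.pyRange_of_pos _ _ (show (0 : Int) < (N : Int) by exact_mod_cast hN)]
  have hcastNN : ((N * N : Nat) : Int) = (N : Int) * (N : Int) := by push_cast; ring
  have hlt : (c : Int) < (N : Int) * (N : Int) := by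
    have : c < N * N := by nlinarith
    omega
  rw [if_pos hlt]
  have e : ((N : Int) * (N : Int) - (c : Int) + (N : Int) - 1) = ((N * N + (N - 1 - c) : Nat) : Int) := by
    omega
  rw [e, ← Int.natCast_ediv]
  have e2 : (N * N + (N - 1 - c)) / N = N := by
    rw [Nat.mul_add_div (by omega)]
    rw [Nat.div_eq_of_lt (by omega)]
    omega
  rw [e2]
  simp only [Int.toNat_natCast]
  apply List.map_congr_left
  intro k _
  push_cast; ring

-- columns of the matrix vs. the strided column groups.
lemma pv_cols (m mv : List Bool) (N : Nat) (hm : N * N ≤ m.length)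
    (hagree : ∀ k < N * N, m.getD k false = mv.getD k false) :
    (PySem.List.pyRange 0 (N : Int) 1).any (fun col =>
      (PySem.List.pyRange 0 (N : Int) 1).all (fun fila =>
        PySem.List.pyGetD (PySem.List.pyGetD ((PySem.List.pyRange 0 (N : Int) 1).map
          (fun fila => PySem.List.slice m (some (fila * (N : Int))) (some ((fila + 1) * (N : Int))))) fila [])
          col false))
    = ((PySem.List.pyRange 0 (N : Int) 1).map
        (fun c => PySem.List.pyRange c ((N : Int) * (N : Int)) (N : Int))).any
        (fun g => g.all (fun i => PySem.List.pyGetD mv i false)) := by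
  rw [List.any_map]
  apply PySem.List.any_congr_mem
  intro col hcol
  rw [PySem.List.mem_pyRange_one] at hcol
  obtain ⟨c, rfl, hc⟩ : ∃ c : Nat, (c : Int) = col ∧ c < N :=
    ⟨col.toNat, by omega, by omega⟩
  simp only [Function.comp_apply]
  rw [pv_all_pyRange]
  rw [pv_colRange c N hc, List.all_map]
  apply pv_all_congr
  intro f hf
  rw [List.mem_range] at hf
  simp only [Function.comp_apply]
  rw [pv_cell m N f c hm hf hc, PySem.List.pyGetD_natCast]
  rw [show c + f * N = f * N + c from by omega]
  exact hagree _ (by nlinarith)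

-- main diagonal.
lemma pv_diag1 (m mv : List Bool) (N : Nat) (hm : N * N ≤ m.length)
    (hagree : ∀ k < N * N, m.getD k false = mv.getD k false) :
    (PySem.List.pyRange 0 (N : Int) 1).all (fun i =>
      PySem.List.pyGetD (PySem.List.pyGetD ((PySem.List.pyRange 0 (N : Int) 1).map
        (fun fila => PySem.List.slice m (some (fila * (N : Int))) (some ((fila + 1) * (N : Int))))) i [])
        i false)
    = ((PySem.List.pyRange 0 (N : Int) 1).map (fun i => i * (N : Int) + i)).all
        (fun i => PySem.List.pyGetD mv i false) := by
  rw [List.all_map, pv_all_pyRange, pv_all_pyRange]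
  apply pv_all_congr
  intro k hk
  rw [List.mem_range] at hk
  simp only [Function.comp_apply]
  rw [pv_cell m N k k hm hk hk]
  have e : (k : Int) * (N : Int) + (k : Int) = ((k * N + k : Nat) : Int) := by push_cast; ring
  rw [e, PySem.List.pyGetD_natCast]
  exact hagree _ (by nlinarith)

-- anti-diagonal.
lemma pv_diag2 (m mv : List Bool) (N : Nat) (hm : N * N ≤ m.length)
    (hagree : ∀ k < N * N, m.getD k false = mv.getD k false) :
    (PySem.List.pyRange 0 (N : Int) 1).all (fun i =>
      PySem.List.pyGetD (PySem.List.pyGetD ((PySem.List.pyRange 0 (N : Int) 1).map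
        (fun fila => PySem.List.slice m (some (fila * (N : Int))) (some ((fila + 1) * (N : Int))))) i [])
        ((N : Int) - 1 - i) false)
    = ((PySem.List.pyRange 0 (N : Int) 1).map (fun i => i * (N : Int) + ((N : Int) - 1 - i))).all
        (fun i => PySem.List.pyGetD mv i false) := by
  rw [List.all_map, pv_all_pyRange, pv_all_pyRange]
  apply pv_all_congr
  intro k hk
  rw [List.mem_range] at hk
  simp only [Function.comp_apply]
  have e0 : (N : Int) - 1 - (k : Int) = ((N - 1 - k : Nat) : Int) := by omega
  rw [e0, pv_cell m N k (N - 1 - k) hm hk (by omega)]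
  have e : (k : Int) * (N : Int) + ((N - 1 - k : Nat) : Int) = ((k * N + (N - 1 - k) : Nat) : Int) := by
    push_cast; ring
  rw [e, PySem.List.pyGetD_natCast]
  exact hagree _ (by nlinarith)

-- the four corners.
lemma pv_corners (m mv : List Bool) (N : Nat) (hm : N * N ≤ m.length) (hN : 1 ≤ N)
    (hagree : ∀ k < N * N, m.getD k false = mv.getD k false) :
    (PySem.List.pyGetD (PySem.List.pyGetD ((PySem.List.pyRange 0 (N : Int) 1).map
        (fun fila => PySem.List.slice m (some (fila * (N : Int))) (some ((fila + 1) * (N : Int))))) 0 []) 0 false &&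
     PySem.List.pyGetD (PySem.List.pyGetD ((PySem.List.pyRange 0 (N : Int) 1).map
        (fun fila => PySem.List.slice m (some (fila * (N : Int))) (some ((fila + 1) * (N : Int))))) 0 []) ((N : Int) - 1) false &&
     PySem.List.pyGetD (PySem.List.pyGetD ((PySem.List.pyRange 0 (N : Int) 1).map
        (fun fila => PySem.List.slice m (some (fila * (N : Int))) (some ((fila + 1) * (N : Int))))) ((N : Int) - 1) []) 0 false &&
     PySem.List.pyGetD (PySem.List.pyGetD ((PySem.List.pyRange 0 (N : Int) 1).map
        (fun fila => PySem.List.slice m (some (fila * (N : Int))) (some ((fila + 1) * (N : Int))))) ((N : Int) - 1) []) ((N : Int) - 1) false)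
    = (([0, (N : Int) - 1, ((N : Int) - 1) * (N : Int), (N : Int) * (N : Int) - 1] : List Int).all
        (fun i => PySem.List.pyGetD mv i false)) := by
  obtain ⟨M, rfl⟩ : ∃ M : Nat, N = M + 1 := ⟨N - 1, by omega⟩
  have e1 : ((M + 1 : Nat) : Int) - 1 = ((M : Nat) : Int) := by push_cast; ring
  have e3 : ((M + 1 : Nat) : Int) * ((M + 1 : Nat) : Int) - 1 = ((M * (M + 1) + M : Nat) : Int) := by
    push_cast; ring
  rw [e1]
  have c00 := pv_cell m (M + 1) 0 0 hm (by omega) (by omega)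
  have c01 := pv_cell m (M + 1) 0 M hm (by omega) (by omega)
  have c10 := pv_cell m (M + 1) M 0 hm (by omega) (by omega)
  have c11 := pv_cell m (M + 1) M M hm (by omega) (by omega)
  simp only [Nat.cast_zero] at c00 c01 c10 c11
  rw [c00, c01, c10, c11]
  simp only [List.all_cons, List.all_nil, Bool.and_true]
  have e2' : ((M : Int) * ((M + 1 : Nat) : Int)) = ((M * (M + 1) : Nat) : Int) := by push_cast; ring
  rw [e2', e3]
  have hb : M * (M + 1) + M < (M + 1) * (M + 1) := by nlinarith
  rw [hagree (0 * (M + 1) + 0) (by omega), hagree (0 * (M + 1) + M) (by omega),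
      hagree (M * (M + 1) + 0) (by omega), hagree (M * (M + 1) + M) (by omega)]
  simp only [PySem.List.pyGetD_natCast]
  simp [Bool.and_assoc, PySem.List.pyGetD_zero]

-- ===== VERDICT (by name: the statement is the Claim_ definition above) =====
theorem validar_loteria_spec : Claim_equal_validar_loteria := by
  intro carton marcadas cantados patron tamano hdom hpre
  obtain ⟨hout, hrest⟩ := hpre
  simp only [Spec_validar_loteria, validar_loteria, validar_loteria_alt]
  rw [pv_guard_eq]
  by_cases hbad : (PySem.List.enumerate marcadas 0).any
      (fun p => p.2 && !(cantados.contains (PySem.List.pyGetD carton p.1 0))) = true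
  · simp only [hbad, Bool.not_true, Bool.not_false, ite_true]
  · rw [Bool.not_eq_true] at hbad
    simp only [hbad, Bool.not_false, Bool.false_eq_true, ite_false, Bool.not_true]
    have hms := pv_guard_pos carton marcadas cantados hbad
    rcases hrest with hfail | ⟨hlen, hshape⟩
    · exact absurd hms hfail
    rw [pv_validos_eq carton marcadas cantados hlen hbad]
    by_cases h1 : patron = "full"
    · have h1t : (patron == "full") = true := by simp [h1]
      simp only [h1t, ite_true]
      simpa using pv_full marcadas carton.length hlen
    · have h1' : (patron == "full") = false := by simp [h1]
      by_cases h2 : patron = "line"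
      · have h2t : (patron == "line") = true := by simp [h2]
        simp only [h1', h2t, Bool.false_eq_true, ite_false, ite_true]
        rw [List.any_append]
        by_cases hpos : 1 ≤ tamano
        · obtain ⟨N, rfl⟩ : ∃ N : Nat, tamano = (N : Int) := ⟨tamano.toNat, by omega⟩
          have hNN : N * N ≤ carton.length := by
            rcases hshape with h | h | h | h
            · exact absurd h h1
            · exact absurd h2 h.1
            · exact_mod_cast h.2
            · have := h.2; omega
          have hmlen : N * N ≤ (marcadas.take carton.length).length := by
            simp; omega
          have hag : ∀ k < N * N, (marcadas.take carton.length).getD k false = marcadas.getD k false :=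
            fun k hk => pv_getD_take marcadas carton.length k (by omega)
          rw [pv_rows (marcadas.take carton.length) marcadas N hmlen hag,
              pv_cols (marcadas.take carton.length) marcadas N hmlen hag]
        · have hnil : PySem.List.pyRange 0 tamano 1 = [] :=
            PySem.List.pyRange_one_eq_nil (by omega)
          simp [hnil]
      · have h2' : (patron == "line") = false := by simp [h2]
        by_cases h3 : patron = "diagonal"
        · have h3t : (patron == "diagonal") = true := by simp [h3]
          simp only [h1', h2', h3t, Bool.false_eq_true, ite_false, ite_true,
            List.any_cons, List.any_nil, Bool.or_false]
          by_cases hpos : 1 ≤ tamano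
          · obtain ⟨N, rfl⟩ : ∃ N : Nat, tamano = (N : Int) := ⟨tamano.toNat, by omega⟩
            have hNN : N * N ≤ carton.length := by
              rcases hshape with h | h | h | h
              · exact absurd h h1
              · exact absurd h3 h.2.1
              · exact_mod_cast h.2
              · have := h.2; omega
            have hmlen : N * N ≤ (marcadas.take carton.length).length := by
              simp; omega
            have hag : ∀ k < N * N, (marcadas.take carton.length).getD k false = marcadas.getD k false :=
              fun k hk => pv_getD_take marcadas carton.length k (by omega)
            rw [pv_diag1 (marcadas.take carton.length) marcadas N hmlen hag,
                pv_diag2 (marcadas.take carton.length) marcadas N hmlen hag]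
          · have hnil : PySem.List.pyRange 0 tamano 1 = [] :=
              PySem.List.pyRange_one_eq_nil (by omega)
            simp [hnil]
        · have h3' : (patron == "diagonal") = false := by simp [h3]
          by_cases h4 : patron = "corners"
          · have h4t : (patron == "corners") = true := by simp [h4]
            simp only [h1', h2', h3', h4t, Bool.false_eq_true, ite_false, ite_true,
              List.any_cons, List.any_nil, Bool.or_false]
            have hpos : 1 ≤ tamano := by
              rcases hshape with h | h | h | h
              · exact absurd h h1
              · exact absurd h4 h.2.2
              · exact h.1
              · rcases h.1 with h' | h'
                · exact absurd h' h2
                · exact absurd h' h3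
            obtain ⟨N, rfl⟩ : ∃ N : Nat, tamano = (N : Int) := ⟨tamano.toNat, by omega⟩
            have hN1 : 1 ≤ N := by exact_mod_cast hpos
            have hNN : N * N ≤ carton.length := by
              rcases hshape with h | h | h | h
              · exact absurd h h1
              · exact absurd h4 h.2.2
              · exact_mod_cast h.2
              · have := h.2; omega
            have hmlen : N * N ≤ (marcadas.take carton.length).length := by
              simp; omega
            have hag : ∀ k < N * N, (marcadas.take carton.length).getD k false = marcadas.getD k false :=
              fun k hk => pv_getD_take marcadas carton.length k (by omega)
            rw [pv_corners (marcadas.take carton.length) marcadas N hmlen hN1 hag]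
          · have h4' : (patron == "corners") = false := by simp [h4]
            simp only [h1', h2', h3', h4', Bool.false_eq_true, ite_false]
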